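-- pv_equiv track=rewrite | github.com/aidenj1808/leetcode | Python/1725_number_of_rectangles_that_can_form_the_largest_square.py | countGoodRectangles
-- ===== SOURCE A (Python) =====
-- def countGoodRectangles(rectangles: list[list[int]]) -> int:
--     count = 0
--     largest_square = float("-inf")
--     for l, w in rectangles:
--         square = min(l, w)
--         if square > largest_square:
--             largest_square = square
--             count = 1
--         elif square == largest_square:
--             count += 1
--     return count
-- ===== SOURCE B (Python) =====
-- def countGoodRectangles(rectangles: list[list[int]]) -> int:
--     sides = [min(l, w) for l, w in rectangles]
--     if not sides:
--         return 0
--     return sides.count(max(sides))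
-- ===== Notes on version B (the rewrite author's own statement) =====
-- stated objective: simpler
-- what changed: Replaces A's fused running-max-and-counter loop with a build-then-two-scans decomposition: map each rectangle to its square side, then take max and count it.
import Mathlib
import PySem

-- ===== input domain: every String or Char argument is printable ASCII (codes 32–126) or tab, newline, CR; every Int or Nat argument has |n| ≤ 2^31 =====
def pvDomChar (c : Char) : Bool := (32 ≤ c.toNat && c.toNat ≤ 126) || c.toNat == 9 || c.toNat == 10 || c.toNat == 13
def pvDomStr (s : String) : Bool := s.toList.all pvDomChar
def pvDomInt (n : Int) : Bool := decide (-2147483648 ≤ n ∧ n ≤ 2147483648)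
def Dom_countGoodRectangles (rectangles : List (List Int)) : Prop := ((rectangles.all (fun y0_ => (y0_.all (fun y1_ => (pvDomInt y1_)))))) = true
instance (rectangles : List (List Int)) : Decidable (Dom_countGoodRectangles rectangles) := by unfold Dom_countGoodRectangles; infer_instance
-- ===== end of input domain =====

-- B changes A's fused running-max-and-counter loop into map-sides, then max, then count (objective: simpler).

-- ===== PORT A =====
-- A's loop: count and largest_square (float("-inf") initial state modelled as Option Int none).
def countGoodRectanglesLoop (count : Int) (largest : Option Int) : List (List Int) → Int
  | [] => count
  | r :: rest =>
    match r with
    | [l, w] =>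
      let square := min l w
      match largest with
      | none => countGoodRectanglesLoop 1 (some square) rest
      | some b =>
        if square > b then countGoodRectanglesLoop 1 (some square) rest
        else if square = b then countGoodRectanglesLoop (count + 1) (some b) rest
        else countGoodRectanglesLoop count (some b) rest
    | _ => count  -- unreachable under Pre_ (Python raises ValueError on unpacking)

def countGoodRectangles (rectangles : List (List Int)) : Int :=
  countGoodRectanglesLoop 0 none rectangles

-- ===== PORT B =====
def countGoodRectangles_alt (rectangles : List (List Int)) : Int :=
  let sides := rectangles.map (fun r =>
    match r with
    | [l, w] => min l w
    | _ => 0)  -- unreachable under Pre_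
  match sides with
  | [] => 0
  | _ =>
    match PySem.List.max? sides (fun x => x) with
    | none => 0
    | some m => (PySem.List.count sides m : Int)

-- ===== PRECONDITION & SPEC =====
-- Pre_ excludes only inputs where some rectangle is not a length-2 list: there Python's 'for l, w in
-- rectangles' raises ValueError, so A returns no value.
def Pre_countGoodRectangles (rectangles : List (List Int)) : Prop :=
  (rectangles.all (fun r => r.length == 2)) = true
instance (rectangles : List (List Int)) : Decidable (Pre_countGoodRectangles rectangles) := by unfold Pre_countGoodRectangles; infer_instance

def pvWitness_countGoodRectangles : List (List Int) := [[5, 8], [3, 9], [5, 12], [16, 5]]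

def Spec_countGoodRectangles (rectangles : List (List Int)) (out : Int) : Prop := out = countGoodRectangles_alt rectangles
instance (rectangles : List (List Int)) (out : Int) : Decidable (Spec_countGoodRectangles rectangles out) := by unfold Spec_countGoodRectangles; infer_instance

-- ===== CLAIM (what is proved, stated in full; the proofs are below) =====
def Claim_equal_countGoodRectangles : Prop := ∀ (rectangles : List (List Int)), Dom_countGoodRectangles rectangles → Pre_countGoodRectangles rectangles → Spec_countGoodRectangles rectangles (countGoodRectangles rectangles)

-- ===== LEMMAS AND PROOFS =====

-- proof helper: A's loop replayed over the already-computed square sides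
def pvLoopS : Int → Option Int → List Int → Int
  | count, _, [] => count
  | _, none, s :: rest => pvLoopS 1 (some s) rest
  | count, some b, s :: rest =>
    if s > b then pvLoopS 1 (some s) rest
    else if s = b then pvLoopS (count + 1) (some b) rest
    else pvLoopS count (some b) rest

def pvSide (r : List Int) : Int :=
  match r with
  | [l, w] => min l w
  | _ => 0

theorem loopA_eq_loopS (rs : List (List Int)) (count : Int) (st : Option Int)
    (h : (rs.all (fun r => r.length == 2)) = true) :
    countGoodRectanglesLoop count st rs = pvLoopS count st (rs.map pvSide) := by
  induction rs generalizing count st with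
  | nil => cases st <;> simp [countGoodRectanglesLoop, pvLoopS]
  | cons r rest ih =>
    simp only [List.all_cons, Bool.and_eq_true, beq_iff_eq] at h
    obtain ⟨hr, hrest⟩ := h
    match r, hr with
    | [l, w], _ =>
      cases st with
      | none => simp only [countGoodRectanglesLoop, List.map_cons, pvLoopS, pvSide]
                exact ih _ _ hrest
      | some b =>
        simp only [countGoodRectanglesLoop, List.map_cons, pvLoopS, pvSide]
        split_ifs <;> exact ih _ _ hrest

theorem loopS_some (xs : List Int) (count b : Int) :
    pvLoopS count (some b) xs =
      (if xs.foldl max b = b then count + (xs.count b : Int)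
       else (xs.count (xs.foldl max b) : Int)) := by
  induction xs generalizing count b with
  | nil => simp [pvLoopS]
  | cons s rest ih =>
    have hle : ∀ (c : Int) (ys : List Int), c ≤ ys.foldl max c := fun c ys =>
      (PySem.List.le_foldl_max ys c).1
    simp only [pvLoopS, List.foldl_cons, List.count_cons]
    by_cases h1 : s > b
    · have hmax : max b s = s := by omega
      rw [if_pos h1, ih, hmax]
      have hne : rest.foldl max s ≠ b := by have := hle s rest; omega
      by_cases h2 : rest.foldl max s = s
      · have : (s == s) = true := by simp
        simp [h2]
        omega
      · have hns : s ≠ rest.foldl max s := fun hc => h2 hc.symm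
        simp [h2, hne, hns]
    · have hmax : max b s = b := by omega
      rw [if_neg h1, hmax]
      by_cases h2 : s = b
      · rw [if_pos h2, ih]
        by_cases h3 : rest.foldl max b = b
        · simp [h3, h2]; omega
        · have hns : s ≠ rest.foldl max b := by have := hle b rest; omega
          simp [h3, hns]
      · rw [if_neg h2, ih]
        by_cases h3 : rest.foldl max b = b
        · simp [h3, h2]
        · have hns : s ≠ rest.foldl max b := by have := hle b rest; omega
          simp [h3, hns]

-- ===== VERDICT (by name: the statement is the Claim_ definition above) =====
theorem countGoodRectangles_spec : Claim_equal_countGoodRectangles := by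
  intro rectangles _ hpre
  unfold Spec_countGoodRectangles countGoodRectangles countGoodRectangles_alt
  match rectangles with
  | [] => simp [countGoodRectanglesLoop]
  | r :: rest =>
    unfold Pre_countGoodRectangles at hpre
    rw [loopA_eq_loopS _ _ _ hpre]
    simp only [List.all_cons, Bool.and_eq_true, beq_iff_eq] at hpre
    obtain ⟨hr, hrest⟩ := hpre
    match r, hr with
    | [l, w], _ =>
      show pvLoopS 0 none ((min l w) :: rest.map pvSide) = _
      simp only [pvLoopS]
      rw [loopS_some]
      have hfold : (rest.map (fun r => match r with | [l, w] => min l w | _ => 0)) = rest.map pvSide := by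
        simp [pvSide]
      simp only [List.map_cons, hfold]
      rw [PySem.List.max?_id_cons]
      simp only [PySem.List.count_eq, List.count_cons]
      have hle : min l w ≤ (rest.map pvSide).foldl max (min l w) :=
        (PySem.List.le_foldl_max _ _).1
      by_cases h : (rest.map pvSide).foldl max (min l w) = min l w
      · simp [h]; omega
      · have hns : ¬ (min l w = (rest.map pvSide).foldl max (min l w)) := fun hc => h hc.symm
        simp [h, hns]
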